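-- pv_equiv track=rewrite | github.com/kai3n/Daily-commit-project | Sanghyun/week47/프렌즈 4블록.py | solution
-- ===== SOURCE A (Python) =====
-- from collections import deque
--
-- def solution(m, n, board):
--     answer = 0
--     check_set = set()
--     # board 초기화
--     board = [list(i) for i in board]
--
--     def check(b):
--         for i in range(m-1):
--             for j in range(n-1):
--                 # 2x2 블록 조건에 맞으면 집합에 해당 인덱스를 추가하는 함수
--                 if b[i][j] == b[i+1][j] == b[i][j+1] == b[i+1][j+1] != '0':
--                     check_set.add((i,j))
--                     check_set.add((i+1,j))
--                     check_set.add((i,j+1))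
--                     check_set.add((i+1,j+1))
--
--     # board 2x2 있을때 재배치
--     def arrange(board):
--         for j in range(len(board[0])):
--             q = deque([])
--
--             for i in range(len(board)-1,-1,-1):
--                 # 2x2해서 0으로 바꼇으면 q에 인덱스 저장
--                 if board[i][j] == '0':
--                     q.append((i,j))
--                 else:
--                     if q:
--                         # 큐가 있으면 값 변경
--                         qi, qj  = q.popleft()
--                         board[qi][qj] = board[i][j]
--                         board[i][j] = '0'
--                         q.append((i, j))
--
--     while True:
--         # 2x2 블록 찾기
--         check(board)
--         if check_set:
--             # board에 인덱스 갱신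
--             for i, j in check_set:
--                 board[i][j] = '0'
--             # 없어진 블록 갯수 저장
--             answer += len(check_set)
--             # 없어진후 배열 재배치
--             arrange(board)
--             # set 다 비움
--             check_set.clear()
--         else:
--             break
--     # 몇개의 블록이 사라졌는지 반환
--     return answer
-- ===== SOURCE B (Python) =====
-- def solution(m, n, board):
--     grid = [list(row) for row in board]
--     answer = 0
--     while True:
--         marked = {p
--                   for i in range(m - 1) for j in range(n - 1)
--                   if grid[i][j] != '0'
--                   and grid[i][j] == grid[i + 1][j] == grid[i][j + 1] == grid[i + 1][j + 1]
--                   for p in ((i, j), (i + 1, j), (i, j + 1), (i + 1, j + 1))}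
--         if not marked:
--             return answer
--         answer += len(marked)
--         grid = [['0' if (i, j) in marked else grid[i][j] for j in range(n)]
--                 for i in range(m)]
--         cols = []
--         for j in range(n):
--             survivors = [grid[i][j] for i in range(m) if grid[i][j] != '0']
--             cols.append(['0'] * (m - len(survivors)) + survivors)
--         grid = [[cols[j][i] for j in range(n)] for i in range(m)]
-- ===== Notes on version B (the rewrite author's own statement) =====
-- stated objective: simpler
-- what changed: The deque-driven in-place gravity pass is replaced by a per-column rebuild (filter the surviving cells, pad with '0' on top, transpose back), and the in-place marking/zeroing mutation is replaced by a set comprehension and a grid-rebuilding comprehension.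
-- outside the precondition, e.g. on solution(3, 5, ['b0b0', 'bbaa', 'bb0baa']): A returns 4, B raises IndexError; on solution(2, 2, ['aa', 'aa', 'bb']): A returns 4, B returns 4
import Mathlib
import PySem

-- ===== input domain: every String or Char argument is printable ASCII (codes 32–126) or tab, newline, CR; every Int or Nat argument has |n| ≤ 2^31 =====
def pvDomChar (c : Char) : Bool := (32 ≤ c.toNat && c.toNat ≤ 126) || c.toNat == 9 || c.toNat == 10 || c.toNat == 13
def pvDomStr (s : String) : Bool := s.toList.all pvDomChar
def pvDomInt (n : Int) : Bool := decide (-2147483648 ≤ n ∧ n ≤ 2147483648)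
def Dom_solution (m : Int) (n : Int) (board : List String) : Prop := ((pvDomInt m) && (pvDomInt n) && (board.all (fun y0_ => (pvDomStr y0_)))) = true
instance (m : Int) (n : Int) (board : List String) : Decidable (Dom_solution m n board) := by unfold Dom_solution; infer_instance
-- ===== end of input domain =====

-- B replaces A's deque-driven in-place gravity by a per-column rebuild (filter the survivors,
-- pad with '0' on top, transpose back) and builds the marked set / zeroed grid by comprehensions
-- instead of in-place mutation; objective: simpler.  Both ports realise Python's `while True`
-- as structural recursion on the same (amply sufficient) fuel `m.toNat * n.toNat + 1`.

-- ===== PORT A =====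
-- board[i][j] read;  default '!' is never reached on inputs admitted by Pre_ (rectangular board)
def pvGet (g : List (List Char)) (i j : Nat) : Char := (g.getD i []).getD j '!'

-- board[i][j] = c
def pvSet (g : List (List Char)) (i j : Nat) (c : Char) : List (List Char) :=
  g.modify i (fun row => row.set j c)

-- A's `check`: nested for-loops adding the four corners of each matching 2x2 block to a set
def checkA (m n : Int) (g : List (List Char)) : PySem.Set (Nat × Nat) :=
  (List.range (m - 1).toNat).foldl (fun s i =>
    (List.range (n - 1).toNat).foldl (fun s j =>
      if pvGet g i j == pvGet g (i+1) j && pvGet g (i+1) j == pvGet g i (j+1) &&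
         pvGet g i (j+1) == pvGet g (i+1) (j+1) && !(pvGet g (i+1) (j+1) == '0')
      then PySem.Set.add (PySem.Set.add (PySem.Set.add (PySem.Set.add s (i, j)) (i+1, j)) (i, j+1)) (i+1, j+1)
      else s) s) PySem.Set.empty

-- A's `arrange`: for each column, scan bottom-up keeping a deque of empty slots
def arrangeA (g0 : List (List Char)) : List (List Char) :=
  (List.range (g0.headD []).length).foldl (fun g j =>
    ((List.range g.length).reverse.foldl (fun (st : List (List Char) × List (Nat × Nat)) i =>
      if pvGet st.1 i j == '0' then (st.1, st.2 ++ [(i, j)])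
      else
        match st.2 with
        | [] => st
        | (qi, qj) :: rest => (pvSet (pvSet st.1 qi qj (pvGet st.1 i j)) i j '0', rest ++ [(i, j)]))
      (g, [])).1) g0

-- A's `while True` loop (fuel-bounded; the fuel passed below always exceeds the number of rounds)
def loopA (m n : Int) : Nat → List (List Char) → Int → Int
  | 0, _, acc => acc
  | fuel + 1, g, acc =>
    let s := checkA m n g
    if s.isEmpty then acc
    else
      loopA m n fuel (arrangeA (s.foldl (fun g p => pvSet g p.1 p.2 '0') g)) (acc + PySem.Set.len s)

def solution (m : Int) (n : Int) (board : List String) : Int :=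
  loopA m n (m.toNat * n.toNat + 1) (board.map String.toList) 0

-- ===== PORT B =====
-- B's marked-set comprehension
def markedB (m n : Int) (g : List (List Char)) : PySem.Set (Nat × Nat) :=
  PySem.Set.ofList ((List.range (m - 1).toNat).flatMap (fun i =>
    (List.range (n - 1).toNat).flatMap (fun j =>
      if !(pvGet g i j == '0') && pvGet g i j == pvGet g (i+1) j &&
         pvGet g (i+1) j == pvGet g i (j+1) && pvGet g i (j+1) == pvGet g (i+1) (j+1)
      then [(i, j), (i+1, j), (i, j+1), (i+1, j+1)]
      else [])))

-- B's gravity: per column filter the survivors, pad with '0', then transpose back to rows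
def gravityB (m n : Int) (g : List (List Char)) : List (List Char) :=
  let cols := (List.range n.toNat).map (fun j =>
    let survivors := ((List.range m.toNat).map (fun i => pvGet g i j)).filter (fun c => c ≠ '0')
    List.replicate (m.toNat - survivors.length) '0' ++ survivors)
  (List.range m.toNat).map (fun i => (List.range n.toNat).map (fun j => pvGet cols j i))

def loopB (m n : Int) : Nat → List (List Char) → Int → Int
  | 0, _, acc => acc
  | fuel + 1, g, acc =>
    let marked := markedB m n g
    if marked.isEmpty then acc
    else
      loopB m n fuel
        (gravityB m n ((List.range m.toNat).map (fun i => (List.range n.toNat).map (fun j =>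
          if PySem.Set.contains marked (i, j) then '0' else pvGet g i j))))
        (acc + PySem.Set.len marked)

def solution_alt (m : Int) (n : Int) (board : List String) : Int :=
  loopB m n (m.toNat * n.toNat + 1) (board.map String.toList) 0

-- ===== PRECONDITION & SPEC =====
-- Pre_ excludes boards whose shape disagrees with the declared m×n (extra/missing rows, rows of
-- another length) when m ≥ 2 and n ≥ 2: there A indexes out of range (IndexError) or, where the
-- ragged scan happens to stay in range, its treatment of the cells beyond the first m×n block is
-- an accident of its implementation.  For m ≤ 1 or n ≤ 1 no 2x2 block exists and any board is admitted.
def Pre_solution (m : Int) (n : Int) (board : List String) : Prop :=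
  m ≤ 1 ∨ n ≤ 1 ∨ ((board.length : Int) = m ∧ ∀ s ∈ board, (s.length : Int) = n)
instance (m : Int) (n : Int) (board : List String) : Decidable (Pre_solution m n board) := by
  unfold Pre_solution; infer_instance

def pvWitness_solution : Int × Int × List String := (2, 2, ["aa", "aa"])

def Spec_solution (m : Int) (n : Int) (board : List String) (out : Int) : Prop := out = solution_alt m n board
instance (m : Int) (n : Int) (board : List String) (out : Int) : Decidable (Spec_solution m n board out) := by unfold Spec_solution; infer_instance

-- ===== CLAIM (what is proved, stated in full; the proofs are below) =====
def Claim_equal_solution : Prop := ∀ (m : Int) (n : Int) (board : List String), Dom_solution m n board → Pre_solution m n board → Spec_solution m n board (solution m n board)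

-- ===== LEMMAS AND PROOFS =====

-- row predicate: every row has length N
def Rows (N : Nat) (g : List (List Char)) : Prop := ∀ row ∈ g, row.length = N

-- column j of a grid
def colOf (g : List (List Char)) (j : Nat) : List Char := g.map (fun row => row.getD j '!')

-- the body of A's inner (per-cell) loop in `arrangeA`, 1-dimensional form
def step1 (st : List Char × List Nat) (i : Nat) : List Char × List Nat :=
  if st.1.getD i '!' == '0' then (st.1, st.2 ++ [i])
  else
    match st.2 with
    | [] => st
    | qi :: rest => ((st.1.set qi (st.1.getD i '!')).set i '0', rest ++ [i])

-- the body of A's inner loop, as written in `arrangeA`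
def step2 (j : Nat) (st : List (List Char) × List (Nat × Nat)) (i : Nat) :
    List (List Char) × List (Nat × Nat) :=
  if pvGet st.1 i j == '0' then (st.1, st.2 ++ [(i, j)])
  else
    match st.2 with
    | [] => st
    | (qi, qj) :: rest => (pvSet (pvSet st.1 qi qj (pvGet st.1 i j)) i j '0', rest ++ [(i, j)])

def innerA (g : List (List Char)) (j : Nat) : List (List Char) :=
  ((List.range g.length).reverse.foldl (step2 j) (g, [])).1

theorem arrangeA_def (g0 : List (List Char)) :
    arrangeA g0 = (List.range (g0.headD []).length).foldl innerA g0 := rfl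

def surv (l : List Char) : List Char := l.filter (fun c => c ≠ '0')

-- the result of the gravity pass on one column
def grav (l : List Char) : List Char :=
  List.replicate (l.length - (surv l).length) '0' ++ surv l

theorem pvGet_col (g : List (List Char)) (i j : Nat) :
    pvGet g i j = (colOf g j).getD i '!' := by
  simp only [pvGet, colOf, List.getD, List.getElem?_map]
  cases h : g[i]? <;> simp

theorem length_pvSet (g : List (List Char)) (i j : Nat) (c : Char) :
    (pvSet g i j c).length = g.length := by simp [pvSet]

theorem rows_pvSet {N : Nat} {g : List (List Char)} (h : Rows N g) (i j : Nat) (c : Char) :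
    Rows N (pvSet g i j c) := by
  intro row hrow
  obtain ⟨k, hk, rfl⟩ := List.mem_iff_getElem.mp hrow
  have hk' : k < g.length := by simpa [pvSet] using hk
  rw [List.getElem_of_eq rfl hk]
  simp only [pvSet, List.getElem_modify]
  split <;> simp [h _ (List.getElem_mem hk')]

theorem colOf_length (g : List (List Char)) (j : Nat) : (colOf g j).length = g.length := by
  simp [colOf]

theorem colOf_pvSet_self {N : Nat} {g : List (List Char)} (h : Rows N g) {j : Nat} (hj : j < N)
    (i : Nat) (c : Char) : colOf (pvSet g i j c) j = (colOf g j).set i c := by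
  apply List.ext_getElem
  · simp [colOf, pvSet]
  · intro k hk1 hk2
    simp only [colOf, pvSet, List.getElem_map, List.getElem_modify, List.getElem_set]
    have hkg : k < g.length := by simpa [colOf, pvSet] using hk1
    by_cases hik : i = k
    · have hlen : j < (g[k]'hkg).length := by rw [h _ (List.getElem_mem hkg)]; exact hj
      simp [hik, List.getD, hlen]
    · simp [hik]

theorem colOf_pvSet_ne (g : List (List Char)) {j j' : Nat} (hne : j' ≠ j) (i : Nat) (c : Char) :
    colOf (pvSet g i j c) j' = colOf g j' := by
  apply List.ext_getElem
  · simp [colOf, pvSet]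
  · intro k hk1 hk2
    simp only [colOf, pvSet, List.getElem_map, List.getElem_modify]
    split
    · simp [List.getD, List.getElem?_set_ne (Ne.symm hne)]
    · rfl

theorem pvGet_pvSet {N : Nat} {g : List (List Char)} (h : Rows N g) {i j : Nat}
    (hi : i < g.length) (hj : j < N) (a b : Nat) (c : Char) :
    pvGet (pvSet g a b c) i j = if a = i ∧ b = j then c else pvGet g i j := by
  by_cases hbj : b = j
  · subst hbj
    rw [pvGet_col, colOf_pvSet_self h hj, pvGet_col]
    have hic : i < (colOf g b).length := by rw [colOf_length]; exact hi
    by_cases hai : a = i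
    · subst hai
      simp [List.getD, hic]
    · simp [List.getD, List.getElem?_set_ne hai, hai]
  · rw [pvGet_col, colOf_pvSet_ne g (Ne.symm hbj), ← pvGet_col]
    simp [hbj]

theorem map_getD_range {α : Type} (l : List α) (d : α) :
    (List.range l.length).map (fun i => l.getD i d) = l := by
  apply List.ext_getElem
  · simp
  · intro k hk1 hk2
    simp [List.getD, List.getElem?_eq_getElem hk2]

-- 1D characterisation of the deque gravity scan: invariant over the bottom-up pass
theorem inv1 (col : List Char) : ∀ k, k ≤ col.length →
    (List.range' (col.length - k) k).reverse.foldl step1 (col, []) =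
      (col.take (col.length - k) ++
         List.replicate (k - (surv (col.drop (col.length - k))).length) '0' ++
         surv (col.drop (col.length - k)),
       (List.range' (col.length - k) (k - (surv (col.drop (col.length - k))).length)).reverse) := by
  intro k
  induction k with
  | zero => simp [surv]
  | succ k ih =>
    intro hk1
    set L := col.length with hL
    set p := L - (k + 1) with hp
    have hpL : p < L := by omega
    have hLk : L - k = p + 1 := by omega
    have hrev : (List.range' p (k+1)).reverse = (List.range' (p+1) k).reverse ++ [p] := by
      rw [List.range'_succ]; simp
    rw [hrev, List.foldl_append,
      show (List.range' (p+1) k) = List.range' (L-k) k from by rw [hLk],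
      ih (by omega), hLk]
    -- abbreviations for the state after the first k steps
    set t := col.take (p+1) with ht
    set sv := surv (col.drop (p+1)) with hsv
    set z := k - sv.length with hz
    have htlen : t.length = p + 1 := by simp [ht]; omega
    have hsvle : sv.length ≤ L - (p+1) := by
      have := List.length_filter_le (fun c => decide (c ≠ '0')) (col.drop (p+1))
      simpa [hsv, surv] using this
    have hzk : z + sv.length = k := by omega
    have hread : (t ++ List.replicate z '0' ++ sv).getD p '!' = col[p] := by
      rw [List.append_assoc, List.getD_append _ _ _ _ (by omega)]
      simp [ht, List.getD, List.getElem?_eq_getElem hpL]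
    have hdropp : col.drop p = col[p] :: col.drop (p+1) := List.drop_eq_getElem_cons hpL
    have htsucc : t = col.take p ++ [col[p]] := List.take_succ_eq_append_getElem hpL
    simp only [List.foldl_cons, List.foldl_nil]
    by_cases hc : col[p] = '0'
    · -- the cell is empty: push its index on the queue
      have : step1 (t ++ List.replicate z '0' ++ sv, (List.range' (p+1) z).reverse) p =
          (t ++ List.replicate z '0' ++ sv, (List.range' (p+1) z).reverse ++ [p]) := by
        rw [step1, hread, hc]; simp
      rw [this]
      have hsurv : surv (col.drop p) = sv := by rw [hdropp, surv, List.filter_cons, hc]; simp [surv, hsv]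
      have hzz : k + 1 - (surv (col.drop p)).length = z + 1 := by rw [hsurv]; omega
      refine Prod.ext ?_ ?_
      · show t ++ List.replicate z '0' ++ sv =
          col.take p ++ List.replicate (k + 1 - (surv (col.drop p)).length) '0' ++ surv (col.drop p)
        rw [hzz, hsurv, htsucc, hc]
        simp [List.replicate_succ]
      · show (List.range' (p+1) z).reverse ++ [p] = (List.range' p (k + 1 - (surv (col.drop p)).length)).reverse
        rw [hzz, List.range'_succ]
        simp
    · have hsurv : surv (col.drop p) = col[p] :: sv := by
        rw [hdropp, surv, List.filter_cons]; simp [hc, surv, hsv]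
      have hzz : k + 1 - (surv (col.drop p)).length = z := by rw [hsurv]; simp; omega
      match hzc : z with
      | 0 =>
        have : step1 (t ++ List.replicate 0 '0' ++ sv, (List.range' (p+1) 0).reverse) p =
            (t ++ List.replicate 0 '0' ++ sv, []) := by
          rw [step1, hread]
          simp [hc]
        rw [this]
        refine Prod.ext ?_ ?_
        · show t ++ List.replicate 0 '0' ++ sv =
            col.take p ++ List.replicate (k + 1 - (surv (col.drop p)).length) '0' ++ surv (col.drop p)
          rw [hzz, hsurv, htsucc]
          simp only [List.replicate_zero, List.nil_append, List.append_assoc, List.singleton_append]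
        · show ([] : List Nat) = (List.range' p (k + 1 - (surv (col.drop p)).length)).reverse
          rw [hzz]; simp
      | z0 + 1 =>
        have hq : (List.range' (p+1) (z0+1)).reverse = (p+1+z0) :: (List.range' (p+1) z0).reverse := by
          rw [List.range'_1_concat]; simp
        have : step1 (t ++ List.replicate (z0+1) '0' ++ sv, (List.range' (p+1) (z0+1)).reverse) p =
            (((t ++ List.replicate (z0+1) '0' ++ sv).set (p+1+z0) col[p]).set p '0',
             (List.range' (p+1) z0).reverse ++ [p]) := by
          rw [step1, hread, hq]
          simp [hc]
        rw [this]
        refine Prod.ext ?_ ?_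
        · show ((t ++ List.replicate (z0+1) '0' ++ sv).set (p+1+z0) col[p]).set p '0' =
            col.take p ++ List.replicate (k + 1 - (surv (col.drop p)).length) '0' ++ surv (col.drop p)
          rw [hzz, hsurv]
          have e1 : (t ++ List.replicate (z0+1) '0' ++ sv).set (p+1+z0) col[p] =
              t ++ (List.replicate z0 '0' ++ [col[p]] ++ sv) := by
            rw [List.append_assoc, List.set_append_right _ _ (by rw [htlen]; omega), htlen,
              show p + 1 + z0 - (p + 1) = z0 by omega,
              List.set_append_left _ _ (by simp),
              List.replicate_succ', List.set_append_right _ _ (by simp), List.length_replicate,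
              Nat.sub_self]
            simp
          rw [e1, List.set_append_left _ _ (by rw [htlen]; omega), htsucc,
            List.set_append_right _ _ (by simp),
            show p - (List.take p col).length = 0 from by simp only [List.length_take]; omega,
            show ([col[p]].set 0 '0') = ['0'] from rfl]
          simp [List.replicate_succ]
        · show (List.range' (p+1) z0).reverse ++ [p] = (List.range' p (k + 1 - (surv (col.drop p)).length)).reverse
          rw [hzz, List.range'_succ]
          simp

theorem grav1_eq (col : List Char) :
    ((List.range col.length).reverse.foldl step1 (col, [])).1 = grav col := by
  have h := inv1 col col.length le_rfl
  rw [Nat.sub_self] at h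
  rw [List.range_eq_range', h]
  simp [grav]

-- 2D scan simulates the 1D scan on column j and leaves the rest of the grid unchanged
theorem sim2 {N : Nat} (j : Nat) (hj : j < N) : ∀ (is : List Nat) (g : List (List Char)) (q : List Nat),
    Rows N g →
    (is.foldl (step2 j) (g, q.map (fun i => (i, j)))).1.length = g.length ∧
    Rows N (is.foldl (step2 j) (g, q.map (fun i => (i, j)))).1 ∧
    colOf (is.foldl (step2 j) (g, q.map (fun i => (i, j)))).1 j = (is.foldl step1 (colOf g j, q)).1 ∧
    (is.foldl (step2 j) (g, q.map (fun i => (i, j)))).2 = (is.foldl step1 (colOf g j, q)).2.map (fun i => (i, j)) ∧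
    (∀ j', j' ≠ j → colOf (is.foldl (step2 j) (g, q.map (fun i => (i, j)))).1 j' = colOf g j') := by
  intro is
  induction is with
  | nil => intro g q hg; exact ⟨rfl, hg, rfl, rfl, fun _ _ => rfl⟩
  | cons i rest ih =>
    intro g q hg
    rw [List.foldl_cons, List.foldl_cons]
    by_cases hcond : pvGet g i j = '0'
    · have h2 : step2 j (g, q.map (fun i => (i, j))) i = (g, (q ++ [i]).map (fun i => (i, j))) := by
        rw [step2]
        simp [hcond]
      have h1 : step1 (colOf g j, q) i = (colOf g j, q ++ [i]) := by
        rw [step1, ← pvGet_col]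
        simp [hcond]
      rw [h2, h1]
      exact ih g (q ++ [i]) hg
    · match q with
      | [] =>
        have h2 : step2 j (g, ([] : List Nat).map (fun i => (i, j))) i = (g, ([] : List Nat).map (fun i => (i, j))) := by
          rw [step2]
          simp [hcond]
        have h1 : step1 (colOf g j, []) i = (colOf g j, []) := by
          rw [step1, ← pvGet_col]
          simp [hcond]
        rw [h2, h1]
        exact ih g [] hg
      | qi :: qrest =>
        have h2 : step2 j (g, (qi :: qrest).map (fun i => (i, j))) i =
            (pvSet (pvSet g qi j (pvGet g i j)) i j '0', (qrest ++ [i]).map (fun i => (i, j))) := by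
          rw [step2]
          simp [hcond]
        have h1 : step1 (colOf g j, qi :: qrest) i =
            (((colOf g j).set qi (pvGet g i j)).set i '0', qrest ++ [i]) := by
          rw [step1, ← pvGet_col]
          simp [hcond]
        rw [h2, h1]
        have hg1 : Rows N (pvSet g qi j (pvGet g i j)) := rows_pvSet hg _ _ _
        have hg2 : Rows N (pvSet (pvSet g qi j (pvGet g i j)) i j '0') := rows_pvSet hg1 _ _ _
        have hcol : colOf (pvSet (pvSet g qi j (pvGet g i j)) i j '0') j =
            ((colOf g j).set qi (pvGet g i j)).set i '0' := by
          rw [colOf_pvSet_self hg1 hj, colOf_pvSet_self hg hj]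
        obtain ⟨l1, l2, l3, l4, l5⟩ := ih (pvSet (pvSet g qi j (pvGet g i j)) i j '0') (qrest ++ [i]) hg2
        refine ⟨?_, l2, ?_, ?_, ?_⟩
        · rw [l1, length_pvSet, length_pvSet]
        · rw [l3, hcol]
        · rw [l4, hcol]
        · intro j' hj'
          rw [l5 j' hj', colOf_pvSet_ne _ hj', colOf_pvSet_ne _ hj']

theorem innerA_spec {N : Nat} {j : Nat} (hj : j < N) (g : List (List Char)) (h : Rows N g) :
    (innerA g j).length = g.length ∧ Rows N (innerA g j) ∧
    colOf (innerA g j) j = grav (colOf g j) ∧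
    (∀ j', j' ≠ j → colOf (innerA g j) j' = colOf g j') := by
  obtain ⟨l1, l2, l3, l4, l5⟩ := sim2 j hj ((List.range g.length).reverse) g [] h
  simp only [List.map_nil] at l1 l2 l3 l4 l5
  have hgrav := grav1_eq (colOf g j)
  rw [colOf_length] at hgrav
  exact ⟨l1, l2, by rw [innerA, l3, hgrav], l5⟩

theorem fold_cols {N : Nat} : ∀ (js : List Nat), js.Nodup → (∀ j ∈ js, j < N) →
    ∀ g : List (List Char), Rows N g →
    (js.foldl innerA g).length = g.length ∧ Rows N (js.foldl innerA g) ∧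
    (∀ j, (j ∈ js → colOf (js.foldl innerA g) j = grav (colOf g j)) ∧
          (j ∉ js → colOf (js.foldl innerA g) j = colOf g j)) := by
  intro js
  induction js with
  | nil => intro _ _ g hg; exact ⟨rfl, hg, fun j => ⟨fun h => absurd h (List.not_mem_nil), fun _ => rfl⟩⟩
  | cons j0 rest ih =>
    intro hnd hmem g hg
    have hj0 : j0 < N := hmem j0 List.mem_cons_self
    obtain ⟨s1, s2, s3, s4⟩ := innerA_spec hj0 g hg
    have hj0rest : j0 ∉ rest := (List.nodup_cons.mp hnd).1
    obtain ⟨r1, r2, r3⟩ := ih (List.nodup_cons.mp hnd).2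
      (fun j hj => hmem j (List.mem_cons_of_mem _ hj)) (innerA g j0) s2
    rw [List.foldl_cons]
    refine ⟨by rw [r1, s1], r2, ?_⟩
    intro j
    constructor
    · intro hjmem
      rcases List.mem_cons.mp hjmem with rfl | hjr
      · rw [(r3 j).2 hj0rest, s3]
      · have hne : j ≠ j0 := fun hc => hj0rest (hc ▸ hjr)
        rw [(r3 j).1 hjr, s4 j hne]
    · intro hjn
      have hne : j ≠ j0 := fun hc => hjn (hc ▸ List.mem_cons_self)
      rw [(r3 j).2 (fun hc => hjn (List.mem_cons_of_mem _ hc)), s4 j hne]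

theorem arrangeA_spec {M N : Nat} {g : List (List Char)} (hlen : g.length = M) (hrows : Rows N g)
    (hhead : (g.headD []).length = N) :
    (arrangeA g).length = M ∧ Rows N (arrangeA g) ∧
    (∀ j, j < N → colOf (arrangeA g) j = grav (colOf g j)) := by
  rw [arrangeA_def, hhead]
  obtain ⟨r1, r2, r3⟩ := fold_cols (List.range N) (List.nodup_range)
    (fun j hj => List.mem_range.mp hj) g hrows
  exact ⟨by rw [r1, hlen], r2, fun j hj => (r3 j).1 (List.mem_range.mpr hj)⟩

theorem grid_eq_of_cols {M N : Nat} {g : List (List Char)} (hlen : g.length = M) (hrows : Rows N g)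
    (f : Nat → Nat → Char) (h : ∀ i, i < M → ∀ j, j < N → pvGet g i j = f i j) :
    g = (List.range M).map (fun i => (List.range N).map (fun j => f i j)) := by
  apply List.ext_getElem
  · simpa using hlen
  · intro i hi1 hi2
    apply List.ext_getElem
    · simpa using hrows _ (List.getElem_mem hi1)
    · intro j hj1 hj2
      have hiM : i < M := by omega
      have hjN : j < N := by simpa using hj2
      have := h i hiM j hjN
      simp only [pvGet, List.getD, List.getElem?_eq_getElem (hlen ▸ hiM : i < g.length)] at this
      simp only [List.getElem_map, List.getElem_range]
      rw [← this]
      have : j < (g[i]'(hlen ▸ hiM)).length := by rw [hrows _ (List.getElem_mem _)]; exact hjN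
      simp [List.getElem?_eq_getElem this]

theorem zero_fold_shape {N : Nat} (s : List (Nat × Nat)) : ∀ g : List (List Char), Rows N g →
    (s.foldl (fun g p => pvSet g p.1 p.2 '0') g).length = g.length ∧
    Rows N (s.foldl (fun g p => pvSet g p.1 p.2 '0') g) := by
  induction s with
  | nil => intro g hg; exact ⟨rfl, hg⟩
  | cons p rest ih =>
    intro g hg
    obtain ⟨h1, h2⟩ := ih (pvSet g p.1 p.2 '0') (rows_pvSet hg _ _ _)
    exact ⟨by simp [List.foldl_cons, h1, length_pvSet], h2⟩

theorem zero_fold_get {N : Nat} (s : List (Nat × Nat)) : ∀ g : List (List Char), Rows N g →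
    (∀ p ∈ s, p.1 < g.length ∧ p.2 < N) → ∀ i, i < g.length → ∀ j, j < N →
    pvGet (s.foldl (fun g p => pvSet g p.1 p.2 '0') g) i j =
      if (i, j) ∈ s then '0' else pvGet g i j := by
  induction s with
  | nil => intro g _ _ i _ j _; simp
  | cons p rest ih =>
    intro g hg hmem i hi j hj
    have hg' := rows_pvSet hg p.1 p.2 '0'
    have hlen' : (pvSet g p.1 p.2 '0').length = g.length := length_pvSet g p.1 p.2 '0'
    rw [List.foldl_cons, ih _ hg'
      (fun q hq => by rw [hlen']; exact hmem q (List.mem_cons_of_mem _ hq)) i (by omega) j hj]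
    rw [pvGet_pvSet hg hi hj]
    by_cases hps : (i, j) ∈ rest
    · simp [hps]
    · by_cases hpp : p = (i, j)
      · simp [hps, hpp]
      · have h2 : ¬(p.1 = i ∧ p.2 = j) := by
          intro hc; exact hpp (Prod.ext hc.1 hc.2)
        have h3 : (i, j) ≠ p := fun h => hpp h.symm
        simp [hps, h2, h3]

theorem foldl_add4 (s : PySem.Set (Nat × Nat)) (c : Bool) (p1 p2 p3 p4 : Nat × Nat) :
    List.foldl PySem.Set.add s (if c then [p1, p2, p3, p4] else []) =
      if c then PySem.Set.add (PySem.Set.add (PySem.Set.add (PySem.Set.add s p1) p2) p3) p4 else s := by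
  cases c <;> rfl

theorem foldl_id {α β : Type} : ∀ (l : List α) (s : β), l.foldl (fun s _ => s) s = s := by
  intro l s; induction l generalizing s <;> simp_all

theorem fold_add4_mem {P : Nat × Nat → Prop} (R1 R2 : Nat) (cond : Nat → Nat → Bool)
    (hP : ∀ i j, i < R1 → j < R2 → P (i, j) ∧ P (i+1, j) ∧ P (i, j+1) ∧ P (i+1, j+1)) :
    ∀ p ∈ (List.range R1).foldl (fun s i => (List.range R2).foldl
        (fun s j => if cond i j then PySem.Set.add (PySem.Set.add (PySem.Set.add (PySem.Set.add s (i, j)) (i+1, j)) (i, j+1)) (i+1, j+1) else s) s)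
        (PySem.Set.empty), P p := by
  have inner : ∀ (i : Nat), i < R1 → ∀ (l2 : List Nat), (∀ j ∈ l2, j < R2) →
      ∀ s : PySem.Set (Nat × Nat), (∀ p ∈ s, P p) →
      ∀ p ∈ l2.foldl (fun s j => if cond i j then PySem.Set.add (PySem.Set.add (PySem.Set.add (PySem.Set.add s (i, j)) (i+1, j)) (i, j+1)) (i+1, j+1) else s) s, P p := by
    intro i hi l2
    induction l2 with
    | nil => intro _ s hs p hp; exact hs p hp
    | cons j rest ih =>
      intro hmem s hs
      apply ih (fun j' hj' => hmem j' (List.mem_cons_of_mem _ hj'))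
      intro p hp
      simp only [] at hp
      split at hp
      · obtain h4 := hP i j hi (hmem j (List.mem_cons_self))
        rcases (PySem.Set.mem_add _ _ _).mp hp with hp | rfl
        rcases (PySem.Set.mem_add _ _ _).mp hp with hp | rfl
        rcases (PySem.Set.mem_add _ _ _).mp hp with hp | rfl
        rcases (PySem.Set.mem_add _ _ _).mp hp with hp | rfl
        · exact hs p hp
        · exact h4.1
        · exact h4.2.1
        · exact h4.2.2.1
        · exact h4.2.2.2
      · exact hs p hp
  have outer : ∀ (l1 : List Nat), (∀ i ∈ l1, i < R1) →
      ∀ s : PySem.Set (Nat × Nat), (∀ p ∈ s, P p) →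
      ∀ p ∈ l1.foldl (fun s i => (List.range R2).foldl
        (fun s j => if cond i j then PySem.Set.add (PySem.Set.add (PySem.Set.add (PySem.Set.add s (i, j)) (i+1, j)) (i, j+1)) (i+1, j+1) else s) s) s, P p := by
    intro l1
    induction l1 with
    | nil => intro _ s hs p hp; exact hs p hp
    | cons i rest ih =>
      intro hmem s hs
      apply ih (fun i' hi' => hmem i' (List.mem_cons_of_mem _ hi'))
      exact inner i (hmem i List.mem_cons_self) (List.range R2) (fun j hj => List.mem_range.mp hj) s hs
  exact outer (List.range R1) (fun i hi => List.mem_range.mp hi) PySem.Set.empty (by intro p hp; simp [PySem.Set.empty] at hp)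

theorem cond_swap (a b c d : Char) :
    (a == b && b == c && c == d && !(d == '0')) = (!(a == '0') && a == b && b == c && c == d) := by
  cases hab : a == b <;> cases hbc : b == c <;> cases hcd : c == d <;> cases h0 : d == '0' <;>
    simp_all [beq_iff_eq]

theorem checkA_eq_markedB (m n : Int) (g : List (List Char)) :
    checkA m n g = markedB m n g := by
  unfold checkA markedB
  rw [PySem.Set.ofList_eq_foldl, List.foldl_flatMap]
  have hfun : (fun (s : PySem.Set (Nat × Nat)) (i : Nat) => (List.range (n - 1).toNat).foldl
        (fun s j => if pvGet g i j == pvGet g (i+1) j && pvGet g (i+1) j == pvGet g i (j+1) &&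
            pvGet g i (j+1) == pvGet g (i+1) (j+1) && !(pvGet g (i+1) (j+1) == '0')
          then PySem.Set.add (PySem.Set.add (PySem.Set.add (PySem.Set.add s (i, j)) (i+1, j)) (i, j+1)) (i+1, j+1)
          else s) s) =
      (fun (s : PySem.Set (Nat × Nat)) (i : Nat) => List.foldl PySem.Set.add s
        ((List.range (n - 1).toNat).flatMap (fun j =>
          if !(pvGet g i j == '0') && pvGet g i j == pvGet g (i+1) j &&
              pvGet g (i+1) j == pvGet g i (j+1) && pvGet g i (j+1) == pvGet g (i+1) (j+1)
            then [(i, j), (i+1, j), (i, j+1), (i+1, j+1)]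
            else []))) := by
    funext s i
    rw [List.foldl_flatMap]
    have hstep : (fun (s : PySem.Set (Nat × Nat)) (j : Nat) =>
        if pvGet g i j == pvGet g (i+1) j && pvGet g (i+1) j == pvGet g i (j+1) &&
            pvGet g i (j+1) == pvGet g (i+1) (j+1) && !(pvGet g (i+1) (j+1) == '0')
          then PySem.Set.add (PySem.Set.add (PySem.Set.add (PySem.Set.add s (i, j)) (i+1, j)) (i, j+1)) (i+1, j+1)
          else s) =
        (fun (s : PySem.Set (Nat × Nat)) (j : Nat) => List.foldl PySem.Set.add s
          (if !(pvGet g i j == '0') && pvGet g i j == pvGet g (i+1) j &&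
              pvGet g (i+1) j == pvGet g i (j+1) && pvGet g i (j+1) == pvGet g (i+1) (j+1)
            then [(i, j), (i+1, j), (i, j+1), (i+1, j+1)]
            else []) ) := by
      funext s' j
      rw [foldl_add4, ← cond_swap]
    rw [hstep]
  rw [hfun]
  rfl

theorem checkA_mem (m n : Int) (g : List (List Char)) :
    ∀ p ∈ checkA m n g, p.1 < (m - 1).toNat + 1 ∧ p.2 < (n - 1).toNat + 1 := by
  unfold checkA
  exact fold_add4_mem (m - 1).toNat (n - 1).toNat _
    (by intro i j hi hj; refine ⟨⟨?_, ?_⟩, ⟨?_, ?_⟩, ⟨?_, ?_⟩, ⟨?_, ?_⟩⟩ <;> simp <;> omega)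

theorem checkA_empty (m n : Int) (g : List (List Char)) (h : (m - 1).toNat = 0 ∨ (n - 1).toNat = 0) :
    checkA m n g = [] := by
  unfold checkA
  rcases h with h | h
  · rw [h]; rfl
  · rw [h]
    simp only [List.range_zero, List.foldl_nil]
    exact foldl_id _ _

theorem map_pvGet_col {M : Nat} (Z : List (List Char)) (hZlen : Z.length = M) (j : Nat) :
    (List.range M).map (fun i => pvGet Z i j) = colOf Z j := by
  subst hZlen
  calc (List.range Z.length).map (fun i => pvGet Z i j)
      = (List.range (colOf Z j).length).map (fun i => (colOf Z j).getD i '!') := by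
        rw [colOf_length]
        exact List.map_congr_left (fun i _ => pvGet_col Z i j)
    _ = colOf Z j := map_getD_range _ _

theorem loop_eq (m n : Int) : ∀ (fuel : Nat) (g : List (List Char)) (acc : Int),
    g.length = m.toNat → Rows n.toNat g →
    loopA m n fuel g acc = loopB m n fuel g acc := by
  intro fuel
  induction fuel with
  | zero => intro g acc _ _; rfl
  | succ fuel ih =>
    intro g acc hlen hrows
    show (let s := checkA m n g
          if s.isEmpty then acc
          else loopA m n fuel (arrangeA (s.foldl (fun g p => pvSet g p.1 p.2 '0') g)) (acc + PySem.Set.len s)) =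
         (let marked := markedB m n g
          if marked.isEmpty then acc
          else loopB m n fuel
            (gravityB m n ((List.range m.toNat).map (fun i => (List.range n.toNat).map (fun j =>
              if PySem.Set.contains marked (i, j) then '0' else pvGet g i j))))
            (acc + PySem.Set.len marked))
    rw [← checkA_eq_markedB]
    set s := checkA m n g with hs
    by_cases hemp : s.isEmpty
    · simp only [hemp, if_pos]
    · simp only [hemp, if_neg, Bool.false_eq_true, not_false_eq_true]
      have hsne : s ≠ [] := by
        intro hc; rw [hc] at hemp; simp at hemp
      have hmn0 : (m - 1).toNat ≠ 0 ∧ (n - 1).toNat ≠ 0 := by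
        constructor <;> intro hc <;> exact hsne (checkA_empty m n g (by tauto))
      have hm2 : 2 ≤ m := by omega
      have hn2 : 2 ≤ n := by omega
      have hmemS : ∀ p ∈ s, p.1 < g.length ∧ p.2 < n.toNat := by
        intro p hp
        obtain ⟨h1, h2⟩ := checkA_mem m n g p hp
        constructor
        · rw [hlen]; omega
        · omega
      obtain ⟨hZlen0, hZrows⟩ := zero_fold_shape (N := n.toNat) s g hrows
      set Z := s.foldl (fun g p => pvSet g p.1 p.2 '0') g with hZ
      have hZlen : Z.length = m.toNat := by rw [hZlen0, hlen]
      have hZeq : Z = (List.range m.toNat).map (fun i => (List.range n.toNat).map (fun j =>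
          if PySem.Set.contains s (i, j) then '0' else pvGet g i j)) := by
        apply grid_eq_of_cols hZlen hZrows
        intro i hi j hj
        rw [hZ, zero_fold_get s g hrows hmemS i (by omega) j hj]
        by_cases hin : (i, j) ∈ s
        · simp [hin]
        · simp [hin]
      have hZne : Z ≠ [] := by
        intro hc
        rw [hc] at hZlen
        simp at hZlen
        omega
      have hhead : (Z.headD []).length = n.toNat := by
        obtain ⟨r, t, hrt⟩ := List.exists_cons_of_ne_nil hZne
        rw [hrt]
        exact hZrows r (by rw [hrt]; exact List.mem_cons_self)
      obtain ⟨ha1, ha2, ha3⟩ := arrangeA_spec hZlen hZrows hhead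
      have hgrid : arrangeA Z = gravityB m n Z := by
        have hmain : arrangeA Z = (List.range m.toNat).map (fun i => (List.range n.toNat).map (fun j =>
            pvGet ((List.range n.toNat).map (fun j =>
              List.replicate (m.toNat - (((List.range m.toNat).map (fun i => pvGet Z i j)).filter (fun c => c ≠ '0')).length) '0' ++
                ((List.range m.toNat).map (fun i => pvGet Z i j)).filter (fun c => c ≠ '0')) ) j i)) := by
          apply grid_eq_of_cols ha1 ha2
          intro i hi j hj
          rw [pvGet_col, ha3 j hj]
          rw [pvGet, PySem.List.getD_map_range _ _ _ _ hj]
          rw [map_pvGet_col Z hZlen j]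
          have hclen : (colOf Z j).length = m.toNat := by rw [colOf_length, hZlen]
          rw [grav, ← hclen]
          rfl
        rw [hmain]
        rfl
      rw [← hZeq, hgrid]
      exact ih (gravityB m n Z) (acc + PySem.Set.len s)
        (by rw [← hgrid, ha1]) (by rw [← hgrid]; exact ha2)

theorem loop_degenerate (m n : Int) (h : (m - 1).toNat = 0 ∨ (n - 1).toNat = 0)
    (K : Nat) (g : List (List Char)) (acc : Int) :
    loopA m n (K + 1) g acc = acc ∧ loopB m n (K + 1) g acc = acc := by
  constructor
  · show (let s := checkA m n g
          if s.isEmpty then acc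
          else loopA m n K (arrangeA (s.foldl (fun g p => pvSet g p.1 p.2 '0') g)) (acc + PySem.Set.len s)) = acc
    simp only [checkA_empty m n g h, List.isEmpty_nil, if_true]
  · show (let marked := markedB m n g
          if marked.isEmpty then acc
          else loopB m n K
            (gravityB m n ((List.range m.toNat).map (fun i => (List.range n.toNat).map (fun j =>
              if PySem.Set.contains marked (i, j) then '0' else pvGet g i j))))
            (acc + PySem.Set.len marked)) = acc
    rw [← checkA_eq_markedB]
    simp only [checkA_empty m n g h, List.isEmpty_nil, if_true]

-- ===== VERDICT (by name: the statement is the Claim_ definition above) =====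
theorem solution_spec : Claim_equal_solution := by
  intro m n board _ hpre
  show solution m n board = solution_alt m n board
  rw [solution, solution_alt]
  rcases hpre with hm | hn | ⟨hblen, hrows⟩
  · exact (loop_degenerate m n (Or.inl (by omega)) _ _ _).1.trans
      (loop_degenerate m n (Or.inl (by omega)) _ _ _).2.symm
  · exact (loop_degenerate m n (Or.inr (by omega)) _ _ _).1.trans
      (loop_degenerate m n (Or.inr (by omega)) _ _ _).2.symm
  · apply loop_eq
    · rw [List.length_map]; omega
    · intro row hrow
      obtain ⟨st, hst, rfl⟩ := List.mem_map.mp hrow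
      have := hrows st hst
      rw [String.length_toList]
      omega
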